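-- pv_equiv track=rewrite | github.com/Liebranca/bitter | src/AVTOMAT/avto-fmat.py | sepcstr
-- ===== SOURCE A (Python) =====
-- def sepcstr(s):
--   pos=[];has=0;prev='';i=0;
--
--   for c in s:
--     if(c=='"' and prev!='\\'):
--       if(has):
--         pos.append(i+1);
--         has=0;
--
--       else:
--         pos.append(i);
--         has=1;
--
--     i+=1;
--
--   return pos;
-- ===== SOURCE B (Python) =====
-- def sepcstr(s):
--     # index pass: positions of unescaped quotes; parity pass: nth quote is opening (even) or closing (odd)
--     idxs = [i for i, (c, p) in enumerate(zip(s, "\x00" + s)) if c == '"' and p != '\\']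
--     return [q + (n % 2) for n, q in enumerate(idxs)]
-- ===== Notes on version B (the rewrite author's own statement) =====
-- stated objective: alternative
-- what changed: Replaces A's single stateful scan (has/prev toggle with appends) by two passes: a comprehension that prebuilds the index list of unescaped quote positions, then a parity map over that list (nth quote gets +0 if opening, +1 if closing); B also actually honours the escape check that A's dead `prev` variable never applies.
-- intended difference: On strings containing a backslash immediately followed by a quote, A still counts the escaped quote (its `prev` variable is initialised to '' and never updated, so the escape test is dead) while B skips it; skipping escaped quotes is what A's own condition `prev != '\\'` evidently intends. — e.g. on sepcstr("\\\""): A returns [1], B returns []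
import Mathlib
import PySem

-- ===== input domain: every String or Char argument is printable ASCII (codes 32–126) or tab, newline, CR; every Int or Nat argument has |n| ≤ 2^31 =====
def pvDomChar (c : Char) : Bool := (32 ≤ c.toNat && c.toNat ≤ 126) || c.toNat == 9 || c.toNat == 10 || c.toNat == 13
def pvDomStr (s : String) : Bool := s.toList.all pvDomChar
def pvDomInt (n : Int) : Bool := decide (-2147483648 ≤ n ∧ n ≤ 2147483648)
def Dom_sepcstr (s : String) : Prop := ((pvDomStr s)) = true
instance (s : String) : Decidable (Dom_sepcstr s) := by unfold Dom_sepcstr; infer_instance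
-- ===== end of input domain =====

-- B replaces A's stateful has/prev scan by two passes: a prebuilt index list of
-- unescaped quote positions, then a parity map over it (objective: alternative).

-- ===== PORT A =====
-- A's `prev` is initialised to '' and never reassigned inside the loop; the port
-- carries it through the fold unchanged, exactly as the Python does.
-- loop body of A's for-loop, as a helper
def pvStepA (st : List Int × Int × String × Int) (c : Char) : List Int × Int × String × Int :=
  let pos := st.1; let has := st.2.1; let prev := st.2.2.1; let i := st.2.2.2
  let ph :=
    if c = '"' ∧ prev ≠ "\\" then
      if has ≠ 0 then (pos ++ [i + 1], (0 : Int)) else (pos ++ [i], (1 : Int))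
    else (pos, has)
  (ph.1, ph.2, prev, i + 1)

def sepcstr (s : String) : List Int :=
  (s.toList.foldl pvStepA ([], 0, "", 0)).1

-- ===== PORT B =====
def sepcstr_alt (s : String) : List Int :=
  let cs := s.toList
  let idxs := (PySem.List.enumerate (cs.zip ('\x00' :: cs))).filterMap
    (fun p => if p.2.1 = '"' ∧ p.2.2 ≠ '\\' then some p.1 else none)
  (PySem.List.enumerate idxs).map (fun p => p.2 + PySem.Int.mod p.1 2)

-- ===== PRECONDITION & SPEC =====
-- On strings containing a backslash immediately followed by a quote, A counts the
-- escaped quote anyway (its `prev` variable is dead, so the escape check never fires),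
-- while B skips it as the function's name and condition intend.
-- does the char list contain a backslash immediately followed by a quote?
def pvHasEscQ : List Char → Bool
  | [] => false
  | [_] => false
  | p :: c :: cs => (p == '\\' && c == '"') || pvHasEscQ (c :: cs)

def D_sepcstr (s : String) : Prop := pvHasEscQ s.toList = true
instance (s : String) : Decidable (D_sepcstr s) := by unfold D_sepcstr; infer_instance
def Spec_sepcstr (s : String) (out : List Int) : Prop := ¬ D_sepcstr s → out = sepcstr_alt s
instance (s : String) (out : List Int) : Decidable (Spec_sepcstr s out) := by unfold Spec_sepcstr; infer_instance
def pvDiffWitness_sepcstr : String := "\\\""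
def pvDiffWitnessOut_sepcstr : (List Int) × (List Int) := ([1], [])

-- ===== CLAIM =====
def Claim_unchanged_sepcstr : Prop := ∀ (s : String), Dom_sepcstr s → Spec_sepcstr s (sepcstr s)
def Claim_changed_sepcstr : Prop := Dom_sepcstr (pvDiffWitness_sepcstr) ∧ D_sepcstr (pvDiffWitness_sepcstr) ∧ sepcstr (pvDiffWitness_sepcstr) = pvDiffWitnessOut_sepcstr.1 ∧ sepcstr_alt (pvDiffWitness_sepcstr) = pvDiffWitnessOut_sepcstr.2 ∧ pvDiffWitnessOut_sepcstr.1 ≠ pvDiffWitnessOut_sepcstr.2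
def Claim_exact_sepcstr : Prop := ∀ (s : String), Dom_sepcstr s → D_sepcstr s → sepcstr s ≠ sepcstr_alt s

-- ===== LEMMAS AND PROOFS =====

-- positions of ALL quotes (what A actually collects, since its prev is dead)
def pvQuotes : List Char → Int → List Int
  | [], _ => []
  | c :: cs, i => if c = '"' then i :: pvQuotes cs (i + 1) else pvQuotes cs (i + 1)

-- positions of unescaped quotes, prev carried (what B's index pass collects)
def pvUnesc : Char → List Char → Int → List Int
  | _, [], _ => []
  | p, c :: cs, i =>
    if c = '"' ∧ p ≠ '\\' then i :: pvUnesc c cs (i + 1) else pvUnesc c cs (i + 1)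

-- alternate +0/+1 over a list of positions
def pvPhase : Bool → List Int → List Int
  | _, [] => []
  | b, q :: qs => (if b then q + 1 else q) :: pvPhase (!b) qs

theorem pvA_loop (cs : List Char) : ∀ (pos : List Int) (has i : Int),
    (cs.foldl pvStepA (pos, has, "", i)).1 = pos ++ pvPhase (has ≠ 0) (pvQuotes cs i) := by
  induction cs with
  | nil => intro pos has i; simp [pvQuotes, pvPhase]
  | cons c cs ih =>
    intro pos has i
    rw [List.foldl_cons]
    by_cases hc : c = '"'
    · by_cases hh : has ≠ 0
      · have hs : pvStepA (pos, has, "", i) c = (pos ++ [i + 1], 0, "", i + 1) := by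
          simp [pvStepA, hc, hh]
        rw [hs, ih]
        simp [pvQuotes, pvPhase, hc, hh, List.append_assoc]
      · have hs : pvStepA (pos, has, "", i) c = (pos ++ [i], 1, "", i + 1) := by
          simp [pvStepA, hc, hh]
        rw [hs, ih]
        simp [pvQuotes, pvPhase, hc, hh, List.append_assoc]
    · have hs : pvStepA (pos, has, "", i) c = (pos, has, "", i + 1) := by
        simp [pvStepA, hc]
      rw [hs, ih]
      simp [pvQuotes, hc]

theorem pvB_idx (cs : List Char) : ∀ (p : Char) (n : Int),
    ((PySem.List.enumerate (cs.zip (p :: cs)) n).filterMap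
      (fun q => if q.2.1 = '"' ∧ q.2.2 ≠ '\\' then some q.1 else none)) = pvUnesc p cs n := by
  induction cs with
  | nil => intro p n; simp [pvUnesc, PySem.List.enumerate_nil]
  | cons c cs ih =>
    intro p n
    by_cases h : c = '"' ∧ p ≠ '\\' <;>
      simp [List.zip_cons_cons, PySem.List.enumerate_cons, h, pvUnesc, ih]

theorem pvB_phase (l : List Int) : ∀ (n : Int),
    (PySem.List.enumerate l n).map (fun p => p.2 + PySem.Int.mod p.1 2)
      = pvPhase (PySem.Int.mod n 2 = 1) l := by
  induction l with
  | nil => intro n; simp [pvPhase, PySem.List.enumerate_nil]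
  | cons q qs ih =>
    intro n
    rw [PySem.List.enumerate_cons, List.map_cons, ih (n + 1)]
    have hm : PySem.Int.mod n 2 = n % 2 := PySem.Int.mod_eq_emod_of_pos (by omega)
    have hm' : PySem.Int.mod (n + 1) 2 = (n + 1) % 2 := PySem.Int.mod_eq_emod_of_pos (by omega)
    rcases Int.emod_two_eq_zero_or_one n with h | h
    · have h1 : (n + 1) % 2 = 1 := by omega
      simp [pvPhase, hm, hm', h, h1]
    · have h1 : (n + 1) % 2 = 0 := by omega
      simp [pvPhase, hm, hm', h, h1]

theorem pvUnesc_eq_quotes (cs : List Char) : ∀ (p : Char) (i : Int),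
    pvHasEscQ (p :: cs) = false → pvUnesc p cs i = pvQuotes cs i := by
  induction cs with
  | nil => intro p i _; simp [pvUnesc, pvQuotes]
  | cons c cs ih =>
    intro p i h
    by_cases hc : c = '"'
    · subst hc
      by_cases hp : p = '\\'
      · subst hp; simp [pvHasEscQ] at h
      · have h2 : pvHasEscQ ('"' :: cs) = false := by simpa [pvHasEscQ, hp] using h
        simp [pvUnesc, pvQuotes, hp]
        exact ih '"' (i + 1) h2
    · have h2 : pvHasEscQ (c :: cs) = false := by
        simp [pvHasEscQ] at h
        tauto
      simp [pvUnesc, pvQuotes, hc]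
      exact ih c (i + 1) h2

theorem pvUnesc_len_le (cs : List Char) : ∀ (p : Char) (i : Int),
    (pvUnesc p cs i).length ≤ (pvQuotes cs i).length := by
  induction cs with
  | nil => intro p i; simp [pvUnesc, pvQuotes]
  | cons c cs ih =>
    intro p i
    by_cases hc : c = '"'
    · subst hc
      have hle := ih '"' (i + 1)
      by_cases hp : p = '\\' <;> simp [pvUnesc, pvQuotes, hp] <;> omega
    · have hle := ih c (i + 1)
      simp [pvUnesc, pvQuotes, hc]
      omega

theorem pvUnesc_len_lt (cs : List Char) : ∀ (p : Char) (i : Int),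
    pvHasEscQ (p :: cs) = true → (pvUnesc p cs i).length < (pvQuotes cs i).length := by
  induction cs with
  | nil => intro p i h; simp [pvHasEscQ] at h
  | cons c cs ih =>
    intro p i h
    simp [pvHasEscQ] at h
    rcases h with ⟨hp, hc⟩ | htail
    · subst hp; subst hc
      have hle := pvUnesc_len_le cs '"' (i + 1)
      simp [pvUnesc, pvQuotes]
      omega
    · by_cases hc : c = '"'
      · subst hc
        have hlt := ih '"' (i + 1) htail
        by_cases hp : p = '\\' <;> simp [pvUnesc, pvQuotes, hp] <;> omega
      · have hlt := ih c (i + 1) htail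
        simp [pvUnesc, pvQuotes, hc]
        omega

theorem pvPhase_len (l : List Int) : ∀ b, (pvPhase b l).length = l.length := by
  induction l with
  | nil => intro b; simp [pvPhase]
  | cons q qs ih => intro b; simp [pvPhase, ih]

theorem pvA_eq (s : String) : sepcstr s = pvPhase false (pvQuotes s.toList 0) := by
  have h := pvA_loop s.toList [] 0 0
  simpa [sepcstr] using h

theorem pvB_eq (s : String) : sepcstr_alt s = pvPhase false (pvUnesc '\x00' s.toList 0) := by
  have h2 := pvB_phase (pvUnesc '\x00' s.toList 0) 0
  rw [show PySem.Int.mod 0 2 = 0 from by decide] at h2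
  simp only [show (decide ((0 : Int) = 1)) = false from by decide] at h2
  simp only [sepcstr_alt]
  rw [pvB_idx s.toList '\x00' 0, h2]

-- ===== VERDICT =====
theorem sepcstr_spec : Claim_unchanged_sepcstr := by
  intro s _ hD
  rw [pvA_eq, pvB_eq]
  have hx : ('\x00' : Char) ≠ '\\' := by decide
  have hni : pvHasEscQ ('\x00' :: s.toList) = false := by
    cases hcs : s.toList with
    | nil => simp [pvHasEscQ]
    | cons c cs =>
      have h2 : pvHasEscQ (c :: cs) = false := by
        have h3 := hD
        unfold D_sepcstr at h3
        rw [hcs] at h3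
        simpa using h3
      simp [pvHasEscQ, h2, hx]
  rw [pvUnesc_eq_quotes s.toList '\x00' 0 hni]

theorem sepcstr_changed : Claim_changed_sepcstr := by
  unfold Claim_changed_sepcstr; decide

theorem sepcstr_tight : Claim_exact_sepcstr := by
  intro s _ hD heq
  have hinf : pvHasEscQ ('\x00' :: s.toList) = true := by
    cases hcs : s.toList with
    | nil =>
      unfold D_sepcstr at hD
      rw [hcs] at hD
      simp [pvHasEscQ] at hD
    | cons c cs =>
      have h2 : pvHasEscQ (c :: cs) = true := by
        unfold D_sepcstr at hD
        rw [hcs] at hD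
        exact hD
      simp [pvHasEscQ, h2]
  have hlt := pvUnesc_len_lt s.toList '\x00' 0 hinf
  have hlen := congrArg List.length heq
  rw [pvA_eq, pvB_eq, pvPhase_len, pvPhase_len] at hlen
  omega
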